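-- pv_equiv track=rewrite | github.com/Asim-2000/HackerRank-Solutions | JimAndSkyScrappers.py | solve
-- ===== SOURCE A (Python) =====
-- def solve(arr):
--     single_route = 0
--     stack = []
--
--     for i in range(len(arr)):
--         while stack and stack[-1][0] < arr[i]:
--             stack.pop()
--         if stack and arr[i] == stack[-1][0]:
--             single_route += stack[-1][1]
--             stack[-1][1] += 1
--         else:
--             stack.append([arr[i], 1])
--
--     return 2*single_route
-- ===== SOURCE B (Python) =====
-- def solve(arr):
--     total = 0
--     prev = []  # earlier buildings, most recent first
--     for x in arr:
--         m = None  # max height strictly between the candidate partner and x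
--         for y in prev:
--             if y == x and (m is None or m <= x):
--                 total += 2
--             if m is None or y > m:
--                 m = y
--         prev = [x] + prev
--     return total
-- ===== Notes on version B (the rewrite author's own statement) =====
-- stated objective: simpler
-- what changed: Replaces A's monotonic stack with pair counters by a plain nested scan: for each building, walk left over earlier buildings keeping a running max and count equal-height partners not blocked by a strictly taller building.
import Mathlib
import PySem

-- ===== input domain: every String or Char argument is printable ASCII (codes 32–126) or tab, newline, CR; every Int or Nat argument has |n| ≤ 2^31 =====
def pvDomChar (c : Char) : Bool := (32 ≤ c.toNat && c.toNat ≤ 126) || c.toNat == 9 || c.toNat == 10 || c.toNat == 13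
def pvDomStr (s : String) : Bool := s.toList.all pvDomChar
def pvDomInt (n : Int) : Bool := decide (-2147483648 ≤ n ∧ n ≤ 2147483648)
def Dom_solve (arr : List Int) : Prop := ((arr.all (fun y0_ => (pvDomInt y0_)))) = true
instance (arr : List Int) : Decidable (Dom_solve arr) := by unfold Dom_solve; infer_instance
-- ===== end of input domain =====

-- B replaces A's monotonic stack by a plain quadratic scan (for each building, walk left
-- keeping a running max to find equal-height visible partners): simpler, not faster.

-- ===== PORT A =====
-- 'while stack and stack[-1][0] < arr[i]: stack.pop()' (stack top = list head here)
def popWhileA (x : Int) : List (Int × Int) → List (Int × Int)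
  | [] => []
  | (v, c) :: s => if v < x then popWhileA x s else (v, c) :: s

-- one iteration of A's for-loop: state = (single_route, stack)
def stepA (st : Int × List (Int × Int)) (x : Int) : Int × List (Int × Int) :=
  match popWhileA x st.2 with
  | [] => (st.1, [(x, 1)])
  | (v, c) :: t => if x = v then (st.1 + c, (v, c + 1) :: t) else (st.1, (x, 1) :: (v, c) :: t)

def solve (arr : List Int) : Int := 2 * (arr.foldl stepA (0, [])).1

-- ===== PORT B =====
-- one iteration of B's inner loop over 'prev': state = (total, m)
def stepInner (x : Int) (tm : Int × Option Int) (y : Int) : Int × Option Int :=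
  match tm with
  | (t, none) => (if y = x then t + 2 else t, some y)
  | (t, some m) => (if y = x ∧ m ≤ x then t + 2 else t, if y > m then some y else some m)

-- one iteration of B's outer loop: state = (total, prev)
def stepB (st : Int × List Int) (x : Int) : Int × List Int :=
  ((st.2.foldl (stepInner x) (st.1, none)).1, x :: st.2)

def solve_alt (arr : List Int) : Int := (arr.foldl stepB (0, [])).1

-- ===== PRECONDITION & SPEC =====
def Spec_solve (arr : List Int) (out : Int) : Prop := out = solve_alt arr
instance (arr : List Int) (out : Int) : Decidable (Spec_solve arr out) := by unfold Spec_solve; infer_instance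

-- ===== CLAIM (what is proved, stated in full; the proofs are below) =====
def Claim_equal_solve : Prop := ∀ (arr : List Int), Dom_solve arr → Spec_solve arr (solve arr)

-- ===== LEMMAS AND PROOFS =====

-- cnt r x = number of entries y in r (most recent first) with y = x and no strictly
-- greater element before it in r: the visible equal-height partners of x.
def cnt : List Int → Int → Int
  | [], _ => 0
  | y :: r, x => (if y = x then 1 else 0) + (if y ≤ x then cnt r x else 0)

def lookupC : List (Int × Int) → Int → Int
  | [], _ => 0
  | (w, c) :: s, v => if w = v then c else lookupC s v

-- invariant tying A's stack to the reversed prefix r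
def InvA (r : List Int) (s : List (Int × Int)) : Prop :=
  (∀ v, lookupC s v = cnt r v) ∧ (s.map Prod.fst).Pairwise (· < ·)

theorem popWhileA_sublist (x : Int) (s : List (Int × Int)) : (popWhileA x s).Sublist s := by
  induction s with
  | nil => simp [popWhileA]
  | cons p s ih =>
    obtain ⟨v, c⟩ := p
    simp only [popWhileA]
    split
    · exact ih.cons _
    · exact List.Sublist.refl _

theorem lookupC_popWhileA (x v : Int) (s : List (Int × Int)) (h : x ≤ v) :
    lookupC (popWhileA x s) v = lookupC s v := by
  induction s with
  | nil => rfl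
  | cons p s ih =>
    obtain ⟨w, c⟩ := p
    simp only [popWhileA, lookupC]
    split
    · rename_i hw
      rw [ih, if_neg (by omega)]
    · rfl

theorem lookupC_eq_zero (v : Int) (s : List (Int × Int))
    (h : ∀ w ∈ s.map Prod.fst, v < w) : lookupC s v = 0 := by
  induction s with
  | nil => rfl
  | cons p s ih =>
    obtain ⟨w, c⟩ := p
    simp only [List.map_cons, List.mem_cons] at h
    have hw : v < w := h w (Or.inl rfl)
    simp only [lookupC, if_neg (by omega : ¬ w = v)]
    exact ih (fun u hu => h u (Or.inr hu))

theorem cnt_cons (y : Int) (r : List Int) (x : Int) :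
    cnt (y :: r) x = (if y = x then 1 else 0) + (if y ≤ x then cnt r x else 0) := rfl

theorem stepA_spec (r : List Int) (s : List (Int × Int)) (route x : Int) (h : InvA r s) :
    (stepA (route, s) x).1 = route + cnt r x ∧ InvA (x :: r) (stepA (route, s) x).2 := by
  obtain ⟨hl, hp⟩ := h
  have hpp : ((popWhileA x s).map Prod.fst).Pairwise (· < ·) :=
    hp.sublist (List.Sublist.map Prod.fst (popWhileA_sublist x s))
  cases hpop : popWhileA x s with
  | nil =>
    have hz : ∀ v, x ≤ v → cnt r v = 0 := by
      intro v hxv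
      rw [← hl v, ← lookupC_popWhileA x v s hxv, hpop]; rfl
    have hstep : stepA (route, s) x = (route, [(x, 1)]) := by
      simp [stepA, hpop]
    rw [hstep]
    refine ⟨by simp [hz x le_rfl], fun v => ?_, by simp⟩
    simp only [lookupC, cnt_cons]
    by_cases hxv : x ≤ v
    · rw [hz v hxv]; simp
    · rw [if_neg hxv]
      have : ¬ x = v := by omega
      simp [this]
  | cons p t =>
    obtain ⟨v, c⟩ := p
    have hvx : ¬ v < x := by
      have aux : ∀ s', popWhileA x s' = (v, c) :: t → ¬ v < x := by
        intro s' hs'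
        induction s' with
        | nil => simp [popWhileA] at hs'
        | cons q s' ih =>
          obtain ⟨w, d⟩ := q
          simp only [popWhileA] at hs'
          split at hs'
          · exact ih hs'
          · rename_i hw
            obtain ⟨h1, h2⟩ := Prod.mk.injEq .. ▸ (List.cons.injEq .. ▸ hs').1
            cases h1; exact hw
      exact aux s hpop
    have hlx : lookupC ((v, c) :: t) x = cnt r x := by
      rw [← hpop, lookupC_popWhileA x x s le_rfl]
      exact hl x
    rw [hpop] at hpp
    simp only [List.map_cons, List.pairwise_cons] at hpp
    obtain ⟨hvt, hpt⟩ := hpp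
    by_cases hxv : x = v
    · subst hxv
      have hcx : c = cnt r x := by
        rw [← hlx]; simp [lookupC]
      have hstep : stepA (route, s) x = (route + c, (x, c + 1) :: t) := by
        simp [stepA, hpop]
      rw [hstep]
      refine ⟨by simp [hcx], fun w => ?_, ?_⟩
      · simp only [lookupC, cnt_cons]
        by_cases hw : x = w
        · subst hw; simp [← hcx]; omega
        · rw [if_neg hw, if_neg hw]
          by_cases hxw : x ≤ w
          · rw [if_pos hxw, ← hl w, ← lookupC_popWhileA x w s hxw, hpop]
            simp [lookupC, hw]
          · rw [if_neg hxw]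
            exact lookupC_eq_zero w t (fun u hu => lt_trans (by omega) (hvt u hu))
      · simp only [List.map_cons]
        exact List.pairwise_cons.mpr ⟨hvt, hpt⟩
    · have hxltv : x < v := by omega
      have hcnt0 : cnt r x = 0 := by
        rw [← hlx]
        simp only [lookupC, if_neg (by omega : ¬ v = x)]
        exact lookupC_eq_zero x t (fun u hu => lt_trans hxltv (hvt u hu))
      have hstep : stepA (route, s) x = (route, (x, 1) :: (v, c) :: t) := by
        simp [stepA, hpop, hxv]
      rw [hstep]
      refine ⟨by simp [hcnt0], fun w => ?_, ?_⟩
      · simp only [lookupC, cnt_cons]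
        by_cases hw : x = w
        · subst hw; simp [hcnt0]
        · rw [if_neg hw, if_neg hw]
          by_cases hxw : x ≤ w
          · rw [if_pos hxw, ← hl w, ← lookupC_popWhileA x w s hxw, hpop]
            simp [lookupC]
          · rw [if_neg hxw]
            by_cases hvw : v = w
            · omega
            · rw [if_neg hvw]
              exact lookupC_eq_zero w t (fun u hu => lt_trans (by omega) (hvt u hu))
      · simp only [List.map_cons, List.pairwise_cons, List.mem_cons]
        refine ⟨?_, fun u hu => hvt u hu, hpt⟩
        rintro u (rfl | hu)
        · exact hxltv
        · exact lt_trans hxltv (hvt u hu)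

def cwAux : Option Int → List Int → Int → Int
  | none, r, x => cnt r x
  | some m', r, x => if m' ≤ x then cnt r x else 0

theorem cwAux_none (r : List Int) (x : Int) : cwAux none r x = cnt r x := rfl

theorem cwAux_some (m' : Int) (r : List Int) (x : Int) :
    cwAux (some m') r x = if m' ≤ x then cnt r x else 0 := rfl

theorem foldl_stepInner (x : Int) (r : List Int) : ∀ (t : Int) (m : Option Int),
    (r.foldl (stepInner x) (t, m)).1 = t + 2 * cwAux m r x := by
  induction r with
  | nil =>
    intro t m
    cases m with
    | none => simp [cwAux_none, cnt]
    | some m' => simp only [List.foldl_nil, cwAux_some, cnt]; split <;> simp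
  | cons y r ih =>
    intro t m
    cases m with
    | none =>
      simp only [List.foldl_cons, stepInner]
      rw [ih]
      simp only [cwAux_none, cwAux_some, cnt_cons]
      split_ifs <;> omega
    | some m' =>
      simp only [List.foldl_cons, stepInner]
      rw [ih]
      simp only [cwAux_some, cnt_cons]
      split_ifs <;> simp only [cwAux_some] <;> (try split_ifs) <;> omega

theorem main_loop (arr : List Int) : ∀ (r : List Int) (s : List (Int × Int)) (route : Int),
    InvA r s → (arr.foldl stepB (2 * route, r)).1 = 2 * (arr.foldl stepA (route, s)).1 := by
  induction arr with
  | nil => intro r s route _; rfl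
  | cons x arr ih =>
    intro r s route h
    obtain ⟨h1, h2⟩ := stepA_spec r s route x h
    simp only [List.foldl_cons]
    have hB : stepB (2 * route, r) x = (2 * (route + cnt r x), x :: r) := by
      simp only [stepB, foldl_stepInner, cwAux_none]
      rw [show 2 * route + 2 * cnt r x = 2 * (route + cnt r x) from by ring]
    have hA : arr.foldl stepA (stepA (route, s) x) =
        arr.foldl stepA (route + cnt r x, (stepA (route, s) x).2) := by
      rw [← h1]
    rw [hB, hA, ih (x :: r) _ (route + cnt r x) h2]

-- ===== VERDICT (by name: the statement is the Claim_ definition above) =====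
theorem solve_spec : Claim_equal_solve := by
  intro arr _
  show solve arr = solve_alt arr
  have : InvA [] [] := ⟨fun v => rfl, List.Pairwise.nil⟩
  have h := main_loop arr [] [] 0 this
  simpa [solve, solve_alt] using h.symm
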